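-- pv_equiv track=rewrite | github.com/ntgptit/memox-v2 | tools/guard/engine/matchers/ast_matcher.py | _collect_declaration_signature
-- ===== SOURCE A (Python) =====
-- OPENING_BRACE = "{"
--
-- COMMENT_PREFIXES = ("//", "///", "/*", "*")
--
-- def _collect_declaration_signature(
--     lines: list[str],
--     start_index: int,
-- ) -> tuple[str, int]:
--     collected: list[str] = []
--
--     for index in range(start_index, len(lines)):
--         line = lines[index]
--         if not collected and (not line.strip() or _is_comment(line)):
--             continue
--
--         collected.append(line.strip())
--         if "=>" in line or OPENING_BRACE in line or ";" in line:
--             return (" ".join(collected).strip(), index)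
--
--     return (" ".join(collected).strip(), len(lines) - 1)
--
-- def _is_comment(line: str) -> bool:
--     stripped = line.strip()
--     return any(stripped.startswith(prefix) for prefix in COMMENT_PREFIXES)
-- ===== SOURCE B (Python) =====
-- OPENING_BRACE = "{"
--
-- COMMENT_PREFIXES = ("//", "///", "/*", "*")
--
--
-- def _is_comment(line):
--     stripped = line.strip()
--     return any(stripped.startswith(prefix) for prefix in COMMENT_PREFIXES)
--
--
-- def _collect_declaration_signature(lines, start_index):
--     # Index-based: locate the first real-content index, then the first
--     # terminator index, then build the output from the slice between them.
--     n = len(lines)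
--     start = next(
--         (i for i in range(start_index, n)
--          if lines[i].strip() and not _is_comment(lines[i])),
--         None,
--     )
--     if start is None:
--         return ("", n - 1)
--     end = next(
--         (i for i in range(start, n)
--          if "=>" in lines[i] or OPENING_BRACE in lines[i] or ";" in lines[i]),
--         None,
--     )
--     stop = end if end is not None else n - 1
--     upto = end + 1 if end is not None else n
--     collected = [lines[i].strip() for i in range(start, upto)]
--     return (" ".join(collected).strip(), stop)
-- ===== Notes on version B (the rewrite author's own statement) =====
-- stated objective: alternative
-- what changed: Replaces A's accumulator loop with an index-based computation: first find the index of the first real-content line and the index of the first terminator line, then build the result by a comprehension over the slice between those indices and a single join.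
import Mathlib
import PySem

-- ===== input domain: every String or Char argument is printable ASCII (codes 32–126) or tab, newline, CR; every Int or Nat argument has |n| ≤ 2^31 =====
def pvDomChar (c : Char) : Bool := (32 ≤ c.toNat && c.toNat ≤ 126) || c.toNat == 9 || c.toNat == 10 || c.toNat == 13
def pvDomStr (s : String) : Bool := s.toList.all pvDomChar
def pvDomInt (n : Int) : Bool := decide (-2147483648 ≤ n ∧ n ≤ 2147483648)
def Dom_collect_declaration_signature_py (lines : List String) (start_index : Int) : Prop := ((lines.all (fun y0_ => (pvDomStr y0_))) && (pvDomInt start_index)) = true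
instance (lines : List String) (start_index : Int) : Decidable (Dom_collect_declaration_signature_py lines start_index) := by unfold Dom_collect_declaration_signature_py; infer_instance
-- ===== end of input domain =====

-- B replaces A's accumulator loop by an index-based computation: find first content
-- index, find first terminator index, then map/join the slice between them.

-- ===== PORT A =====
def pvIsComment (line : String) : Bool :=
  let stripped := PySem.Str.strip line
  ["//", "///", "/*", "*"].any (fun p => PySem.Str.startswith stripped p)

def pvTerminator (line : String) : Bool :=
  PySem.Str.isIn "=>" line || PySem.Str.isIn "{" line || PySem.Str.isIn ";" line

def pvGoA (lines : List String) : List Int → List String → String × Int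
  | [], collected => (PySem.Str.strip (PySem.Str.join " " collected), (lines.length : Int) - 1)
  | i :: rest, collected =>
    let line := PySem.List.pyGetD lines i ""
    if collected = [] ∧ (PySem.Str.strip line = "" ∨ pvIsComment line) then
      pvGoA lines rest collected
    else
      let collected' := collected ++ [PySem.Str.strip line]
      if pvTerminator line then (PySem.Str.strip (PySem.Str.join " " collected'), i)
      else pvGoA lines rest collected'

def collect_declaration_signature_py (lines : List String) (start_index : Int) : String × Int :=
  pvGoA lines (PySem.List.pyRange start_index (lines.length : Int) 1) []

-- ===== PORT B =====
-- first index ≥ i with real content (not blank, not a comment)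
def pvFindContent (lines : List String) (i : Int) : Option Int :=
  if h : i < (lines.length : Int) then
    let line := PySem.List.pyGetD lines i ""
    if PySem.Str.strip line = "" ∨ pvIsComment line then pvFindContent lines (i + 1)
    else some i
  else none
termination_by ((lines.length : Int) - i).toNat
decreasing_by omega

-- first index ≥ i whose line contains a terminator token
def pvFindTerm (lines : List String) (i : Int) : Option Int :=
  if h : i < (lines.length : Int) then
    if pvTerminator (PySem.List.pyGetD lines i "") then some i
    else pvFindTerm lines (i + 1)
  else none
termination_by ((lines.length : Int) - i).toNat
decreasing_by omega

def pvStripAt (lines : List String) (i : Int) : String :=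
  PySem.Str.strip (PySem.List.pyGetD lines i "")

def collect_declaration_signature_py_alt (lines : List String) (start_index : Int) : String × Int :=
  let n : Int := (lines.length : Int)
  match pvFindContent lines start_index with
  | none => ("", n - 1)
  | some s =>
    match pvFindTerm lines s with
    | none =>
        (PySem.Str.strip (PySem.Str.join " " ((PySem.List.pyRange s n 1).map (pvStripAt lines))), n - 1)
    | some e =>
        (PySem.Str.strip (PySem.Str.join " " ((PySem.List.pyRange s (e + 1) 1).map (pvStripAt lines))), e)

-- ===== PRECONDITION & SPEC =====
-- Pre_ holds exactly when the Python A returns: for start_index < -len(lines) both A and B raise IndexError.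
def Pre_collect_declaration_signature_py (lines : List String) (start_index : Int) : Prop :=
  -(lines.length : Int) ≤ start_index
instance (lines : List String) (start_index : Int) : Decidable (Pre_collect_declaration_signature_py lines start_index) := by unfold Pre_collect_declaration_signature_py; infer_instance

def pvWitness_collect_declaration_signature_py : List String × Int :=
  (["// header", "def f(x)", "  -> int;"], 0)

def Spec_collect_declaration_signature_py (lines : List String) (start_index : Int) (out : String × Int) : Prop := out = collect_declaration_signature_py_alt lines start_index
instance (lines : List String) (start_index : Int) (out : String × Int) : Decidable (Spec_collect_declaration_signature_py lines start_index out) := by unfold Spec_collect_declaration_signature_py; infer_instance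

-- ===== CLAIM =====
def Claim_equal_collect_declaration_signature_py : Prop := ∀ (lines : List String) (start_index : Int), Dom_collect_declaration_signature_py lines start_index → Pre_collect_declaration_signature_py lines start_index → Spec_collect_declaration_signature_py lines start_index (collect_declaration_signature_py lines start_index)

-- ===== LEMMAS AND PROOFS =====

-- pvFindTerm only returns indices ≥ its argument.
theorem pvFindTerm_ge (lines : List String) (k : Nat) (i : Int)
    (hk : ((lines.length : Int) - i).toNat = k) (e : Int)
    (he : pvFindTerm lines i = some e) : i ≤ e := by
  induction k generalizing i with
  | zero =>
    rw [pvFindTerm, dif_neg (by omega : ¬ i < (lines.length : Int))] at he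
    exact absurd he (by simp)
  | succ k ih =>
    by_cases hlt : i < (lines.length : Int)
    · rw [pvFindTerm, dif_pos hlt] at he
      split at he
      · simp only [Option.some.injEq] at he
        omega
      · have := ih (i + 1) (by omega) he
        omega
    · rw [pvFindTerm, dif_neg hlt] at he
      exact absurd he (by simp)

-- A's collect tail (collected nonempty, skip test dead) computed by terminator search.
theorem pvGoA_collect (lines : List String) (k : Nat) (i : Int)
    (hk : ((lines.length : Int) - i).toNat = k) (collected : List String)
    (hne : collected ≠ []) :
    pvGoA lines (PySem.List.pyRange i (lines.length : Int) 1) collected =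
      match pvFindTerm lines i with
      | none =>
          (PySem.Str.strip (PySem.Str.join " " (collected ++ (PySem.List.pyRange i (lines.length : Int) 1).map (pvStripAt lines))), (lines.length : Int) - 1)
      | some e =>
          (PySem.Str.strip (PySem.Str.join " " (collected ++ (PySem.List.pyRange i (e + 1) 1).map (pvStripAt lines))), e) := by
  induction k generalizing i collected with
  | zero =>
    have hge : (lines.length : Int) ≤ i := by omega
    rw [PySem.List.pyRange_one_eq_nil hge, pvFindTerm, dif_neg (by omega : ¬ i < (lines.length : Int)), pvGoA]
    simp
  | succ k ih =>
    have hlt : i < (lines.length : Int) := by omega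
    rw [PySem.List.pyRange_one_cons hlt, pvGoA]
    simp only [hne, false_and, if_false]
    rw [pvFindTerm, dif_pos hlt]
    by_cases hterm : pvTerminator (PySem.List.pyGetD lines i "")
    · rw [if_pos hterm, if_pos hterm]
      have : PySem.List.pyRange i (i + 1) 1 = [i] := PySem.List.pyRange_one_singleton i
      simp [this, pvStripAt]
    · rw [if_neg hterm, if_neg hterm]
      rw [ih (i + 1) (by omega) (collected ++ [PySem.Str.strip (PySem.List.pyGetD lines i "")]) (by simp)]
      cases he : pvFindTerm lines (i + 1) with
      | none =>
        simp [pvStripAt, List.append_assoc]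
      | some e =>
        have hie : i + 1 ≤ e := pvFindTerm_ge lines _ (i + 1) rfl e he
        simp [pvStripAt, List.append_assoc, PySem.List.pyRange_one_cons (by omega : i < e + 1)]

-- A's whole loop (skip phase + collect tail) equals B's index-based computation.
theorem pvGoA_nil (lines : List String) (k : Nat) (i : Int)
    (hk : ((lines.length : Int) - i).toNat = k) :
    pvGoA lines (PySem.List.pyRange i (lines.length : Int) 1) [] =
      collect_declaration_signature_py_alt lines i := by
  induction k generalizing i with
  | zero =>
    have hge : (lines.length : Int) ≤ i := by omega
    rw [PySem.List.pyRange_one_eq_nil hge, pvGoA]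
    unfold collect_declaration_signature_py_alt
    rw [pvFindContent, dif_neg (by omega : ¬ i < (lines.length : Int))]
    simp [PySem.Str.join, PySem.Str.strip]
    decide
  | succ k ih =>
    have hlt : i < (lines.length : Int) := by omega
    rw [PySem.List.pyRange_one_cons hlt, pvGoA]
    by_cases hskip : PySem.Str.strip (PySem.List.pyGetD lines i "") = "" ∨ pvIsComment (PySem.List.pyGetD lines i "")
    · rw [if_pos ⟨rfl, hskip⟩]
      have hc : pvFindContent lines i = pvFindContent lines (i + 1) := by
        rw [pvFindContent, dif_pos hlt, if_pos hskip]
      unfold collect_declaration_signature_py_alt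
      rw [hc]
      have := ih (i + 1) (by omega)
      unfold collect_declaration_signature_py_alt at this
      exact this
    · rw [if_neg (fun hc => hskip hc.2)]
      have hc : pvFindContent lines i = some i := by
        rw [pvFindContent, dif_pos hlt, if_neg hskip]
      unfold collect_declaration_signature_py_alt
      simp only [hc]
      by_cases hterm : pvTerminator (PySem.List.pyGetD lines i "")
      · have ht : pvFindTerm lines i = some i := by
          rw [pvFindTerm, dif_pos hlt, if_pos hterm]
        rw [if_pos hterm]
        simp only [ht]
        simp [PySem.List.pyRange_one_singleton, pvStripAt]
      · have ht : pvFindTerm lines i = pvFindTerm lines (i + 1) := by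
          rw [pvFindTerm, dif_pos hlt, if_neg hterm]
        rw [if_neg hterm]
        simp only [List.nil_append]
        rw [pvGoA_collect lines k (i + 1) (by omega) [PySem.Str.strip (PySem.List.pyGetD lines i "")] (by simp)]
        simp only [ht]
        cases he : pvFindTerm lines (i + 1) with
        | none =>
          simp [pvStripAt, PySem.List.pyRange_one_cons hlt]
        | some e =>
          have hie : i + 1 ≤ e := pvFindTerm_ge lines _ (i + 1) rfl e he
          simp [pvStripAt, PySem.List.pyRange_one_cons (by omega : i < e + 1)]

-- ===== VERDICT =====
theorem collect_declaration_signature_py_spec : Claim_equal_collect_declaration_signature_py := by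
  intro lines start_index _ _
  unfold Spec_collect_declaration_signature_py collect_declaration_signature_py
  exact pvGoA_nil lines _ start_index rfl
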